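-- pv_equiv track=rewrite | github.com/tarunyadav0204/Astrology | backend/context_agents/compact_vedic.py | house_lordships_from_ascendant
-- ===== SOURCE A (Python) =====
-- from typing import Dict, List
--
-- SIGN_LORDS: Dict[int, str] = {
--     0: "Mars",
--     1: "Venus",
--     2: "Mercury",
--     3: "Moon",
--     4: "Sun",
--     5: "Mercury",
--     6: "Venus",
--     7: "Mars",
--     8: "Jupiter",
--     9: "Saturn",
--     10: "Saturn",
--     11: "Jupiter",
-- }
--
-- def house_lordships_from_ascendant(asc_sign_0_11: int) -> Dict[str, List[int]]:
--     """
--     Planet -> houses ruled (whole-sign from ascendant), same mapping as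
--     ChatContextBuilder._get_house_lordships.
--     """
--     out: Dict[str, List[int]] = {}
--     for house in range(1, 13):
--         house_sign = (asc_sign_0_11 + house - 1) % 12
--         lord = SIGN_LORDS[house_sign]
--         out.setdefault(lord, []).append(house)
--     for k in out:
--         out[k] = sorted(out[k])
--     return out
-- ===== SOURCE B (Python) =====
-- from typing import Dict, List
--
-- LORD_SIGNS: Dict[str, List[int]] = {
--     "Mars": [0, 7],
--     "Venus": [1, 6],
--     "Mercury": [2, 5],
--     "Moon": [3],
--     "Sun": [4],
--     "Jupiter": [8, 11],
--     "Saturn": [9, 10],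
-- }
--
-- def house_lordships_from_ascendant(asc_sign_0_11: int) -> Dict[str, List[int]]:
--     items = [
--         (lord, sorted(((sign - asc_sign_0_11) % 12) + 1 for sign in signs))
--         for lord, signs in LORD_SIGNS.items()
--     ]
--     # key order: a lord enters the mapping at its earliest ruled house
--     items.sort(key=lambda kv: kv[1][0])
--     return dict(items)
-- ===== Notes on version B (the rewrite author's own statement) =====
-- stated objective: alternative
-- what changed: Inverts the control flow: instead of scanning the twelve houses in order and accumulating lists per lord with setdefault, B iterates a static lord-to-ruled-signs table, computes each lord's houses directly from its signs and the ascendant offset, and orders the entries by earliest house (which equals A's first-insertion order).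
import Mathlib
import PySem

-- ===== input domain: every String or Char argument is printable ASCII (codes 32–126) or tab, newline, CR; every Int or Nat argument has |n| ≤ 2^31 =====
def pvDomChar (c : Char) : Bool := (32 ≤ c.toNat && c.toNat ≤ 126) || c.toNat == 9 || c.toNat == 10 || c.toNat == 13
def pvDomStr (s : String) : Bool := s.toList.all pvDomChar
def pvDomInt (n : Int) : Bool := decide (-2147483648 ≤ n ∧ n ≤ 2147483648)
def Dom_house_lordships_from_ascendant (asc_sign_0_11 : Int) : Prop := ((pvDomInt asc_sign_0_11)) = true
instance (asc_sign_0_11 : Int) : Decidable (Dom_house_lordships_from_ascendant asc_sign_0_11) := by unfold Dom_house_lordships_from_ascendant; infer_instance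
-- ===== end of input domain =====

-- B inverts the control flow: a static lord → ruled-signs table, houses computed per lord
-- and entries sorted by earliest house (= A's first-insertion order); same values, no guard code.

-- ===== PORT A =====
def SIGN_LORDS : PySem.Dict Int String := PySem.Dict.ofList
  [(0, "Mars"), (1, "Venus"), (2, "Mercury"), (3, "Moon"), (4, "Sun"), (5, "Mercury"),
   (6, "Venus"), (7, "Mars"), (8, "Jupiter"), (9, "Saturn"), (10, "Saturn"), (11, "Jupiter")]

def house_lordships_from_ascendant (asc_sign_0_11 : Int) : List (String × List Int) :=
  let out : PySem.Dict String (List Int) :=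
    (PySem.List.pyRange 1 13 1).foldl (fun out house =>
      let house_sign := PySem.Int.mod (asc_sign_0_11 + house - 1) 12
      -- SIGN_LORDS[house_sign]: key always present (house_sign ∈ 0..11), so getD "" never fires
      let lord := (SIGN_LORDS.get? house_sign).getD ""
      out.modify lord [] (· ++ [house])) PySem.Dict.empty
  let out := out.keys.foldl
    (fun d k => d.insert k (PySem.List.sorted (d.getD k []) (fun x => x) false)) out
  out.items

-- ===== PORT B =====
def LORD_SIGNS : List (String × List Int) :=
  [("Mars", [0, 7]), ("Venus", [1, 6]), ("Mercury", [2, 5]), ("Moon", [3]),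
   ("Sun", [4]), ("Jupiter", [8, 11]), ("Saturn", [9, 10])]

def house_lordships_from_ascendant_alt (asc_sign_0_11 : Int) : List (String × List Int) :=
  let items := LORD_SIGNS.map (fun kv =>
    (kv.1, PySem.List.sorted (kv.2.map (fun sign => PySem.Int.mod (sign - asc_sign_0_11) 12 + 1))
           (fun x => x) false))
  -- kv[1][0]: each houses list is nonempty, so headD 0 never uses the default
  let items := PySem.List.sorted items (fun kv => kv.2.headD 0) false
  (PySem.Dict.ofList items).items

-- ===== PRECONDITION & SPEC =====
def Spec_house_lordships_from_ascendant (asc_sign_0_11 : Int) (out : List (String × List Int)) : Prop := out = house_lordships_from_ascendant_alt asc_sign_0_11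
instance (asc_sign_0_11 : Int) (out : List (String × List Int)) : Decidable (Spec_house_lordships_from_ascendant asc_sign_0_11 out) := by unfold Spec_house_lordships_from_ascendant; infer_instance

-- ===== CLAIM (what is proved, stated in full; the proofs are below) =====
def Claim_equal_house_lordships_from_ascendant : Prop := ∀ (asc_sign_0_11 : Int), Dom_house_lordships_from_ascendant asc_sign_0_11 → Spec_house_lordships_from_ascendant asc_sign_0_11 (house_lordships_from_ascendant asc_sign_0_11)

-- ===== LEMMAS AND PROOFS =====

-- Both ports depend on the ascendant only through asc % 12.
lemma A_mod (asc : Int) :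
    house_lordships_from_ascendant asc = house_lordships_from_ascendant (asc % 12) := by
  have h : ∀ x : Int, PySem.Int.mod (asc + x - 1) 12 = PySem.Int.mod (asc % 12 + x - 1) 12 := by
    intro x
    rw [PySem.Int.mod_eq_emod_of_pos (by norm_num), PySem.Int.mod_eq_emod_of_pos (by norm_num)]
    omega
  simp only [house_lordships_from_ascendant, h]

lemma B_mod (asc : Int) :
    house_lordships_from_ascendant_alt asc = house_lordships_from_ascendant_alt (asc % 12) := by
  have h : ∀ x : Int, PySem.Int.mod (x - asc) 12 = PySem.Int.mod (x - asc % 12) 12 := by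
    intro x
    rw [PySem.Int.mod_eq_emod_of_pos (by norm_num), PySem.Int.mod_eq_emod_of_pos (by norm_num)]
    omega
  simp only [house_lordships_from_ascendant_alt, h]

-- ===== VERDICT (by name: the statement is the Claim_ definition above) =====
theorem house_lordships_from_ascendant_spec : Claim_equal_house_lordships_from_ascendant := by
  intro asc _
  unfold Spec_house_lordships_from_ascendant
  rw [A_mod, B_mod]
  have h1 : 0 ≤ asc % 12 := Int.emod_nonneg _ (by norm_num)
  have h2 : asc % 12 < 12 := Int.emod_lt_of_pos _ (by norm_num)
  set r := asc % 12 with hr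
  interval_cases r <;> decide
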